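-- pv_equiv track=rewrite | github.com/Fridayai700/crossing | report.py | _classify_overall_risk
-- ===== SOURCE A (Python) =====
-- def _classify_overall_risk(crossings: list[dict]) -> str:
--     """Determine overall project risk level from crossings."""
--     high_count = sum(1 for c in crossings if c["risk_level"] == "high")
--     elevated_count = sum(1 for c in crossings if c["risk_level"] == "elevated")
--     medium_count = sum(1 for c in crossings if c["risk_level"] == "medium")
--
--     if high_count >= 3:
--         return "High"
--     elif high_count >= 1 or elevated_count >= 3:
--         return "Medium-High"
--     elif elevated_count >= 1 or medium_count >= 3:
--         return "Medium"
--     elif medium_count >= 1: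
--         return "Low-Medium"
--     return "Low"
-- ===== SOURCE B (Python) =====
-- def _classify_overall_risk(crossings: list[dict]) -> str:
--     """Determine overall project risk level from crossings."""
--     # Single pass: fold each crossing into a numeric severity score (max of per-level
--     # ranks, where a level's rank is bumped once its running count reaches 3), then
--     # index a label table -- no count variables compared in an if/elif ladder.
--     LABELS = ["Low", "Low-Medium", "Medium", "Medium-High", "High"]
--     score = h = e = m = 0
--     for c in crossings:
--         lvl = c["risk_level"]
--         if lvl == "high":
--             h += 1
--             score = max(score, 4 if h >= 3 else 3)
--         elif lvl == "elevated":
--             e += 1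
--             score = max(score, 3 if e >= 3 else 2)
--         elif lvl == "medium":
--             m += 1
--             score = max(score, 2 if m >= 3 else 1)
--     return LABELS[score]
-- ===== Notes on version B (the rewrite author's own statement) =====
-- stated objective: alternative
-- what changed: Replaces A's three separate counting scans followed by an if/elif threshold ladder with a single fold that maintains a numeric severity score (max of per-level ranks, bumped when a level's running count reaches 3) and then indexes a label table with that score.
import Mathlib
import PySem

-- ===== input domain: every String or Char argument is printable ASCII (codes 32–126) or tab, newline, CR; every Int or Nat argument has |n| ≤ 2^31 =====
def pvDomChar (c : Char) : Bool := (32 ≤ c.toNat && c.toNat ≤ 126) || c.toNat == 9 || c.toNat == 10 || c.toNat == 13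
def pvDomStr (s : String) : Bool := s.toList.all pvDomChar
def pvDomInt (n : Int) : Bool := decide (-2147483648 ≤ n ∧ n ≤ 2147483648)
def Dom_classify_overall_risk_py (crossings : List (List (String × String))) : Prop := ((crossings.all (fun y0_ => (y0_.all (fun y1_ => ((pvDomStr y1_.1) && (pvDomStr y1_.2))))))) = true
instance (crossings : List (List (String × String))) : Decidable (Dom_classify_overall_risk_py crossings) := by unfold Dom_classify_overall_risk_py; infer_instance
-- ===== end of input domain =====

-- B replaces A's three counting scans + if/elif ladder with one fold computing a numeric
-- severity score indexed into a label table; objective: alternative (same cost, different shape).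

-- ===== PORT A =====
-- sum(1 for c in crossings if c["risk_level"] == v) — filter then sum of 1s;
-- c["risk_level"] is Dict.get?, which under Pre_ always yields `some`.
def classify_overall_risk_py (crossings : List (List (String × String))) : String :=
  let high_count : Int :=
    ((crossings.filter (fun c => (PySem.Dict.mk c).get? "risk_level" == some "high")).map
      (fun _ => (1 : Int))).sum
  let elevated_count : Int :=
    ((crossings.filter (fun c => (PySem.Dict.mk c).get? "risk_level" == some "elevated")).map
      (fun _ => (1 : Int))).sum
  let medium_count : Int :=
    ((crossings.filter (fun c => (PySem.Dict.mk c).get? "risk_level" == some "medium")).map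
      (fun _ => (1 : Int))).sum
  if high_count ≥ 3 then "High"
  else if high_count ≥ 1 ∨ elevated_count ≥ 3 then "Medium-High"
  else if elevated_count ≥ 1 ∨ medium_count ≥ 3 then "Medium"
  else if medium_count ≥ 1 then "Low-Medium"
  else "Low"

-- ===== PORT B =====
-- lvl = c["risk_level"]; under Pre_ the key is present, "" is the total default.
def pvLvl (c : List (String × String)) : String := (PySem.Dict.mk c).getD "risk_level" ""

-- the body of B's for-loop: state (score, h, e, m)
def pvStepB (st : Int × Int × Int × Int) (c : List (String × String)) : Int × Int × Int × Int :=
  let lvl := pvLvl c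
  if lvl == "high" then
    (max st.1 (if st.2.1 + 1 ≥ 3 then 4 else 3), st.2.1 + 1, st.2.2.1, st.2.2.2)
  else if lvl == "elevated" then
    (max st.1 (if st.2.2.1 + 1 ≥ 3 then 3 else 2), st.2.1, st.2.2.1 + 1, st.2.2.2)
  else if lvl == "medium" then
    (max st.1 (if st.2.2.2 + 1 ≥ 3 then 2 else 1), st.2.1, st.2.2.1, st.2.2.2 + 1)
  else st

def classify_overall_risk_py_alt (crossings : List (List (String × String))) : String :=
  let st := crossings.foldl pvStepB (0, 0, 0, 0)
  -- LABELS[score]; score is always in 0..4, so the index is in range and the default unreachable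
  (PySem.List.pyGet? ["Low", "Low-Medium", "Medium", "Medium-High", "High"] st.1).getD "Low"

-- ===== PRECONDITION & SPEC =====
-- Pre_: every crossing has the "risk_level" key — Python's c["risk_level"] raises KeyError otherwise.
def Pre_classify_overall_risk_py (crossings : List (List (String × String))) : Prop :=
  ∀ c ∈ crossings, "risk_level" ∈ c.map Prod.fst
instance (crossings : List (List (String × String))) : Decidable (Pre_classify_overall_risk_py crossings) := by unfold Pre_classify_overall_risk_py; infer_instance

def pvWitness_classify_overall_risk_py : (List (List (String × String))) :=
  [[("risk_level", "high")], [("risk_level", "low"), ("id", "7")]]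

def Spec_classify_overall_risk_py (crossings : List (List (String × String))) (out : String) : Prop := out = classify_overall_risk_py_alt crossings
instance (crossings : List (List (String × String))) (out : String) : Decidable (Spec_classify_overall_risk_py crossings out) := by unfold Spec_classify_overall_risk_py; infer_instance

-- ===== CLAIM (what is proved, stated in full; the proofs are below) =====
def Claim_equal_classify_overall_risk_py : Prop := ∀ (crossings : List (List (String × String))), Dom_classify_overall_risk_py crossings → Pre_classify_overall_risk_py crossings → Spec_classify_overall_risk_py crossings (classify_overall_risk_py crossings)

-- ===== LEMMAS AND PROOFS =====

-- the severity score as a function of the three final counts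
def pvScore (h e m : Int) : Int :=
  max (max (if h ≥ 3 then 4 else if h ≥ 1 then 3 else 0)
           (if e ≥ 3 then 3 else if e ≥ 1 then 2 else 0))
      (if m ≥ 3 then 2 else if m ≥ 1 then 1 else 0)

def pvCH (l : List (List (String × String))) : Int := l.countP (fun c => pvLvl c == "high")
def pvCE (l : List (List (String × String))) : Int := l.countP (fun c => pvLvl c == "elevated")
def pvCM (l : List (List (String × String))) : Int := l.countP (fun c => pvLvl c == "medium")

theorem pv_foldB (l : List (List (String × String))) (h e m : Int)
    (hh : 0 ≤ h) (he : 0 ≤ e) (hm : 0 ≤ m) :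
    l.foldl pvStepB (pvScore h e m, h, e, m)
      = (pvScore (h + pvCH l) (e + pvCE l) (m + pvCM l),
         h + pvCH l, e + pvCE l, m + pvCM l) := by
  induction l generalizing h e m with
  | nil => simp [pvCH, pvCE, pvCM]
  | cons c t ih =>
    rw [List.foldl_cons]
    by_cases h1 : pvLvl c == "high"
    · have h2 : (pvLvl c == "elevated") = false := by
        simp only [beq_iff_eq] at h1 ⊢; simp [h1]
      have h3 : (pvLvl c == "medium") = false := by
        simp only [beq_iff_eq] at h1 ⊢; simp [h1]
      have hstep : pvStepB (pvScore h e m, h, e, m) c = (pvScore (h + 1) e m, h + 1, e, m) := by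
        simp only [pvStepB, h1, if_true]
        have : max (pvScore h e m) (if h + 1 ≥ 3 then 4 else 3) = pvScore (h + 1) e m := by
          unfold pvScore; split_ifs <;> omega
        simp [this]
      rw [hstep, ih (h + 1) e m (by omega) he hm]
      simp only [pvCH, pvCE, pvCM, List.countP_cons, h1, h2, h3]
      push_cast
      ring_nf
    · by_cases h2 : pvLvl c == "elevated"
      · have h1' : (pvLvl c == "high") = false := by simpa using h1
        have h3 : (pvLvl c == "medium") = false := by
          simp only [beq_iff_eq] at h2 ⊢; simp [h2]
        have hstep : pvStepB (pvScore h e m, h, e, m) c = (pvScore h (e + 1) m, h, e + 1, m) := by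
          simp only [pvStepB, h1', h2, if_true, Bool.false_eq_true, if_false]
          have : max (pvScore h e m) (if e + 1 ≥ 3 then 3 else 2) = pvScore h (e + 1) m := by
            unfold pvScore; split_ifs <;> omega
          simp [this]
        rw [hstep, ih h (e + 1) m hh (by omega) hm]
        simp only [pvCH, pvCE, pvCM, List.countP_cons, h1', h2, h3]
        push_cast
        ring_nf
      · by_cases h3 : pvLvl c == "medium"
        · have h1' : (pvLvl c == "high") = false := by simpa using h1
          have h2' : (pvLvl c == "elevated") = false := by simpa using h2
          have hstep : pvStepB (pvScore h e m, h, e, m) c = (pvScore h e (m + 1), h, e, m + 1) := by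
            simp only [pvStepB, h1', h2', h3, if_true, Bool.false_eq_true, if_false]
            have : max (pvScore h e m) (if m + 1 ≥ 3 then 2 else 1) = pvScore h e (m + 1) := by
              unfold pvScore; split_ifs <;> omega
            simp [this]
          rw [hstep, ih h e (m + 1) hh he (by omega)]
          simp only [pvCH, pvCE, pvCM, List.countP_cons, h1', h2', h3]
          push_cast
          ring_nf
        · have h1' : (pvLvl c == "high") = false := by simpa using h1
          have h2' : (pvLvl c == "elevated") = false := by simpa using h2
          have h3' : (pvLvl c == "medium") = false := by simpa using h3
          have hstep : pvStepB (pvScore h e m, h, e, m) c = (pvScore h e m, h, e, m) := by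
            simp [pvStepB, h1', h2', h3']
          rw [hstep, ih h e m hh he hm]
          simp [pvCH, pvCE, pvCM, h1', h2', h3']

-- A's 0/1 comprehension sum at level v is the same countP (v ≠ "", the total default of getD).
theorem pv_sum_eq_countP (crossings : List (List (String × String))) (v : String) (hv : v ≠ "") :
    ((crossings.filter (fun c => (PySem.Dict.mk c).get? "risk_level" == some v)).map
      (fun _ => (1 : Int))).sum
      = (crossings.countP (fun c => pvLvl c == v) : Int) := by
  rw [List.map_const', List.sum_replicate, nsmul_eq_mul, mul_one, ← List.countP_eq_length_filter]
  congr 1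
  apply List.countP_congr
  intro c _
  simp only [pvLvl, PySem.Dict.getD_eq_get?_getD]
  cases h : (PySem.Dict.mk c).get? "risk_level" with
  | none => simp [Ne.symm hv]
  | some w => simp

-- A's if/elif ladder on the three counts reads the same label B's score indexes.
theorem pv_ladder (h e m : Int) (hh : 0 ≤ h) (he : 0 ≤ e) (hm : 0 ≤ m) :
    (if h ≥ 3 then "High"
     else if h ≥ 1 ∨ e ≥ 3 then "Medium-High"
     else if e ≥ 1 ∨ m ≥ 3 then "Medium"
     else if m ≥ 1 then "Low-Medium"
     else "Low")
      = (PySem.List.pyGet? ["Low", "Low-Medium", "Medium", "Medium-High", "High"]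
          (pvScore h e m)).getD "Low" := by
  unfold pvScore
  split_ifs <;> first
    | rfl
    | omega

-- ===== VERDICT (by name: the statement is the Claim_ definition above) =====
theorem classify_overall_risk_py_spec : Claim_equal_classify_overall_risk_py := by
  intro crossings _ _
  show _ = _
  unfold classify_overall_risk_py classify_overall_risk_py_alt
  have hf := pv_foldB crossings 0 0 0 le_rfl le_rfl le_rfl
  have h0 : pvScore 0 0 0 = 0 := by decide
  rw [h0] at hf
  simp only [hf, zero_add]
  simp only [pv_sum_eq_countP crossings "high" (by decide),
    pv_sum_eq_countP crossings "elevated" (by decide),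
    pv_sum_eq_countP crossings "medium" (by decide)]
  exact pv_ladder _ _ _ (by positivity) (by positivity) (by positivity)
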